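-- pv_equiv track=rewrite | github.com/ecastillo999/RetosKotlin2022Moure | Python/Challenge7.py | has_punctuation
-- ===== SOURCE A (Python) =====
-- def has_punctuation(phrase: str) -> list:
--     """
--     Función que realiza la extracción de símbolos de puntuación de una frase, y separa en palabras.
--     """
--
--     # Símbolos de puntuación que serán eliminados
--     punctuation_chars = [".", ",", ":", ";", "!", "¡", "?", "¿", "(", ")", "{", "}", "[", "]", "-"]
--     new_word = ""
--
--     for char in phrase:
--         # Si el caracter en la frase se encuentra dentro del listado de puntuación, lo elimina
--         if char in punctuation_chars:
--             char = ""
--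
--         # Concatena el caracter en un String.
--         new_word += char
--
--     # El bucle For anterior, se pudo haber sustituido por:
--     #
--     # for _ in punctuation_chars:
--     #   phrase = phrase.replace(_, "")
--     # Return phrase.lower().split(" ")
--     #
--
--     return new_word.lower().split(" ")
-- ===== SOURCE B (Python) =====
-- def has_punctuation(phrase: str) -> list:
--     # Single pass building the word list directly: no intermediate cleaned string,
--     # no lower() over the whole string, no split() at the end.
--     punctuation_chars = [".", ",", ":", ";", "!", "\u00a1", "?", "\u00bf", "(", ")", "{", "}", "[", "]", "-"]
--     words = []
--     current = ""
--     for char in phrase: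
--         if char == " ":
--             words.append(current)
--             current = ""
--         elif char not in punctuation_chars:
--             current += char.lower()
--     words.append(current)
--     return words
-- ===== Notes on version B (the rewrite author's own statement) =====
-- stated objective: alternative
-- what changed: B builds the word list directly in one pass over the characters (emit current word on a space, skip punctuation, lowercase each kept character), replacing A's clean-into-a-new-string pass followed by whole-string lowering and splitting.
import Mathlib
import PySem

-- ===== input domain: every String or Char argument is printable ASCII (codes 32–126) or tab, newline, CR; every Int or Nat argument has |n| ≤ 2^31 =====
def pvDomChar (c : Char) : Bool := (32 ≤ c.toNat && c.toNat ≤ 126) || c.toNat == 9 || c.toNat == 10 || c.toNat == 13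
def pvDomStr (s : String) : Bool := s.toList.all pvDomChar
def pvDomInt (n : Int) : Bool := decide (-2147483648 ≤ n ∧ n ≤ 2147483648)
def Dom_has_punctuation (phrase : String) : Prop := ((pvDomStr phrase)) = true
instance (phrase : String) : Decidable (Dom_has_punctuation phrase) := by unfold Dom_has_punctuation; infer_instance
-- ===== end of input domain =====

-- B builds the word list in a single pass (emit on space, skip punctuation, lowercase each kept
-- char) instead of A's clean-then-lower()-then-split(" ") staging; same return value everywhere.

def punctuation_chars : List Char :=
  ['.', ',', ':', ';', '!', '¡', '?', '¿', '(', ')', '{', '}', '[', ']', '-']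

-- ===== PORT A =====
-- Builds new_word character by character, dropping punctuation, then lower().split(" ").
def has_punctuation (phrase : String) : List String :=
  -- split(" "): separator is the non-empty literal " ", so split? is always some
  ((PySem.Str.split?
    (PySem.Str.lower (String.ofList
      (phrase.toList.foldl (fun nw c => nw ++ (if punctuation_chars.contains c then [] else [c])) [])))
    " ").getD [])

-- ===== PORT B =====
-- One pass with state (words, current): a space emits current, punctuation is skipped,
-- any other char is lowercased onto current; the final current is appended at the end.
def has_punctuation_alt (phrase : String) : List String :=
  let st := phrase.toList.foldl
    (fun (st : List String × List Char) c =>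
      if c = ' ' then (st.1 ++ [String.ofList st.2], [])
      else if punctuation_chars.contains c then st
      else (st.1, st.2 ++ [PySem.Chars.lowerChar c]))
    ([], [])
  st.1 ++ [String.ofList st.2]

-- ===== PRECONDITION & SPEC =====
def Spec_has_punctuation (phrase : String) (out : List String) : Prop := out = has_punctuation_alt phrase
instance (phrase : String) (out : List String) : Decidable (Spec_has_punctuation phrase out) := by unfold Spec_has_punctuation; infer_instance

-- ===== CLAIM =====
def Claim_equal_has_punctuation : Prop := ∀ (phrase : String), Dom_has_punctuation phrase → Spec_has_punctuation phrase (has_punctuation phrase)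

-- ===== LEMMAS AND PROOFS =====

-- proof-only reference splitter on ' ' carrying the current word in order
def mySplit : List Char → List Char → List (List Char)
  | [], w => [w]
  | c :: rest, w => if c = ' ' then w :: mySplit rest [] else mySplit rest (w ++ [c])

-- lowerChar maps nothing but ' ' to ' '
theorem lowerChar_eq_space_iff (c : Char) : PySem.Chars.lowerChar c = ' ' ↔ c = ' ' := by
  unfold PySem.Chars.lowerChar PySem.Chars.isupper
  split
  · next h =>
    simp only [Bool.and_eq_true, decide_eq_true_eq] at h
    obtain ⟨h1, h2⟩ := h
    have hA : 65 ≤ c.toNat := h1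
    have hZ : c.toNat ≤ 90 := h2
    constructor
    · intro he
      have h32 : (Char.ofNat (c.toNat + 32)).toNat = 32 := by rw [he]; rfl
      have hv : (Char.ofNat (c.toNat + 32)).toNat = c.toNat + 32 := by
        rw [Char.toNat_ofNat]
        have : (c.toNat + 32).isValidChar := by constructor; omega
        simp [this]
      omega
    · intro h'; subst h'; exact absurd hA (by decide)
  · simp

-- the fuelled splitOn.go with separator " " is mySplit
theorem splitOn_go_mySplit :
    ∀ (fuel : Nat) (l cur : List Char) (acc : List (List Char)), l.length ≤ fuel →
      PySem.Chars.splitOn.go [' '] fuel l cur acc = acc.reverse ++ mySplit l cur.reverse := by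
  intro fuel
  induction fuel with
  | zero =>
    intro l cur acc h
    have : l = [] := List.eq_nil_of_length_eq_zero (Nat.le_zero.mp h)
    subst this
    simp [PySem.Chars.splitOn.go, mySplit]
  | succ n ih =>
    intro l cur acc h
    cases l with
    | nil => simp [PySem.Chars.splitOn.go, mySplit]
    | cons c rest =>
      have ht : rest.length ≤ n := by simp at h; omega
      simp only [PySem.Chars.splitOn.go]
      by_cases hc : c = ' '
      · subst hc
        rw [if_pos (by simp [List.isPrefixOf])]
        simp only [List.length_cons, List.length_nil, Nat.zero_add, List.drop_succ_cons,
          List.drop_zero]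
        rw [ih rest [] (cur.reverse :: acc) ht]
        simp [mySplit]
      · rw [if_neg (by simp [List.isPrefixOf]; exact fun h' => hc h'.symm)]
        rw [ih rest (c :: cur) acc ht]
        simp [mySplit, hc]

theorem splitOn_space (l : List Char) :
    PySem.Chars.splitOn l [' '] = mySplit l [] := by
  rw [PySem.Chars.splitOn]
  simpa using splitOn_go_mySplit (l.length + 1) l [] [] (by omega)

-- A's accumulator loop is a filter
theorem foldl_acc_filter (l : List Char) :
    l.foldl (fun nw c => nw ++ (if punctuation_chars.contains c then [] else [c])) []
      = l.filter (fun x => !punctuation_chars.contains x) := by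
  have h : ∀ (l acc : List Char),
      l.foldl (fun nw c => nw ++ (if punctuation_chars.contains c then [] else [c])) acc
        = acc ++ l.filter (fun x => !punctuation_chars.contains x) := by
    intro l
    induction l with
    | nil => intro acc; simp
    | cons c t ih =>
      intro acc
      rw [List.foldl_cons, ih, List.filter_cons]
      by_cases hc : c ∈ punctuation_chars
      · simp [hc]
      · simp [hc]
  simpa using h l []

-- B's one-pass loop computes mySplit of the cleaned, lowered characters
theorem b_loop_mySplit :
    ∀ (l : List Char) (ws : List String) (w : List Char),
      ((l.foldl
          (fun (st : List String × List Char) c =>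
            if c = ' ' then (st.1 ++ [String.ofList st.2], [])
            else if punctuation_chars.contains c then st
            else (st.1, st.2 ++ [PySem.Chars.lowerChar c]))
          (ws, w)).1 ++ [String.ofList (l.foldl
          (fun (st : List String × List Char) c =>
            if c = ' ' then (st.1 ++ [String.ofList st.2], [])
            else if punctuation_chars.contains c then st
            else (st.1, st.2 ++ [PySem.Chars.lowerChar c]))
          (ws, w)).2])
      = ws ++ (mySplit ((l.filter (fun x => !punctuation_chars.contains x)).map
          PySem.Chars.lowerChar) w).map String.ofList := by
  intro l
  induction l with
  | nil => intro ws w; simp [mySplit]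
  | cons c rest ih =>
    intro ws w
    simp only [List.foldl_cons]
    by_cases hsp : c = ' '
    · subst hsp
      rw [if_pos rfl]
      have hnp : (' ' ∈ punctuation_chars) = False := by simp [punctuation_chars]
      rw [ih (ws ++ [String.ofList w]) []]
      have hl : PySem.Chars.lowerChar ' ' = ' ' := rfl
      simp [hnp, mySplit, hl]
    · rw [if_neg hsp]
      by_cases hp : punctuation_chars.contains c
      · rw [if_pos hp]
        rw [ih ws w]
        simp [List.contains_iff_mem.mp hp]
      · rw [if_neg hp]
        rw [ih ws (w ++ [PySem.Chars.lowerChar c])]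
        have hmem : c ∉ punctuation_chars := by
          intro h; exact hp (List.contains_iff_mem.mpr h)
        have hls : PySem.Chars.lowerChar c ≠ ' ' := by
          intro h; exact hsp ((lowerChar_eq_space_iff c).mp h)
        simp [hmem, mySplit, hls]

-- ===== VERDICT =====
theorem has_punctuation_spec : Claim_equal_has_punctuation := by
  intro phrase _
  unfold Spec_has_punctuation has_punctuation has_punctuation_alt
  rw [foldl_acc_filter]
  rw [b_loop_mySplit phrase.toList [] []]
  simp only [PySem.Str.split?, PySem.Chars.split?]
  have hsep : (" ").toList = [' '] := rfl
  rw [hsep]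
  simp only [List.isEmpty_cons, Bool.false_eq_true, if_false, Option.map_some, Option.getD_some]
  have hlow : (PySem.Str.lower (String.ofList
      (phrase.toList.filter (fun x => !punctuation_chars.contains x)))).toList
      = (phrase.toList.filter (fun x => !punctuation_chars.contains x)).map
          PySem.Chars.lowerChar := by
    simp [PySem.Chars.lower]
  rw [hlow, splitOn_space]
  simp
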